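-- pv_equiv track=rewrite | github.com/nammayatri/agents-platform | src/agents/api/routes/project_chat.py | _is_plan_acceptance
-- ===== SOURCE A (Python) =====
-- def _is_plan_acceptance(message: str) -> bool:
--     """Check if the user message is accepting the proposed plan."""
--     lower = message.lower().strip()
--     accept_phrases = [
--         "looks good", "approve", "accept", "go ahead", "lgtm",
--         "ship it", "proceed", "let's do it", "start", "yes",
--         "perfect", "do it", "execute", "run it",
--     ]
--     return any(phrase in lower for phrase in accept_phrases)
-- ===== SOURCE B (Python) =====
-- def _is_plan_acceptance(message: str) -> bool:
--     """Check if the user message is accepting the proposed plan."""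
--     lower = message.lower().strip()
--     accept_phrases = (
--         "looks good", "approve", "accept", "go ahead", "lgtm",
--         "ship it", "proceed", "let's do it", "start", "yes",
--         "perfect", "do it", "execute", "run it",
--     )
--     # single left-to-right pass over positions: does any phrase start here?
--     return any(lower.startswith(p, i) for i in range(len(lower)) for p in accept_phrases)
-- ===== Notes on version B (the rewrite author's own statement) =====
-- stated objective: alternative
-- what changed: Replaced the per-phrase substring-membership loop ('phrase in lower' for each phrase) by a single position-indexed scan over the string that at each index tests whether some phrase starts there (startswith with a start offset), i.e. traversal by position instead of traversal by phrase.
import Mathlib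
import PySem

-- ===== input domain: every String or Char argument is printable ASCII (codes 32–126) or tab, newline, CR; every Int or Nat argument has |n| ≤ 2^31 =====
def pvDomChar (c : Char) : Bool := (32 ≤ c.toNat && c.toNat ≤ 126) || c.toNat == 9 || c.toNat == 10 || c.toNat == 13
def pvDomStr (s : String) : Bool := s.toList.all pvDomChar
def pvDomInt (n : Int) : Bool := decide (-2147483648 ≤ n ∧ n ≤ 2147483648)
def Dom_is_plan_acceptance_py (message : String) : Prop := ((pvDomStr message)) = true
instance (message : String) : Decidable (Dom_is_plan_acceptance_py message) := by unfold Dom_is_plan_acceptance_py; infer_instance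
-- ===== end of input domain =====

-- B replaces A's per-phrase substring-membership loop by a single position-indexed
-- scan testing at each index whether some phrase starts there (alternative, same cost).

def pvAcceptPhrases : List String :=
  ["looks good", "approve", "accept", "go ahead", "lgtm",
   "ship it", "proceed", "let's do it", "start", "yes",
   "perfect", "do it", "execute", "run it"]

-- ===== PORT A =====
def is_plan_acceptance_py (message : String) : Bool :=
  let lower := PySem.Str.strip (PySem.Str.lower message)
  pvAcceptPhrases.any (fun phrase => PySem.Str.isIn phrase lower)

-- ===== PORT B =====
-- lower.startswith(p, i) with 0 ≤ i ≤ len(lower): Python compares p against lower[i:],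
-- exactly PySem.Chars.startswith (lower.toList.drop i) p.toList.
def is_plan_acceptance_py_alt (message : String) : Bool :=
  let lower := PySem.Str.strip (PySem.Str.lower message)
  (List.range lower.toList.length).any (fun i =>
    pvAcceptPhrases.any (fun p => PySem.Chars.startswith (lower.toList.drop i) p.toList))

-- ===== PRECONDITION & SPEC =====
def Spec_is_plan_acceptance_py (message : String) (out : Bool) : Prop := out = is_plan_acceptance_py_alt message
instance (message : String) (out : Bool) : Decidable (Spec_is_plan_acceptance_py message out) := by unfold Spec_is_plan_acceptance_py; infer_instance

-- ===== CLAIM (what is proved, stated in full; the proofs are below) =====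
def Claim_equal_is_plan_acceptance_py : Prop := ∀ (message : String), Dom_is_plan_acceptance_py message → Spec_is_plan_acceptance_py message (is_plan_acceptance_py message)

-- ===== LEMMAS AND PROOFS =====

-- Core fact: for nonempty phrases, "some phrase is a substring of l" equals
-- "at some index i < l.length some phrase is a prefix of l.drop i".
theorem pvScan_eq (l : List Char) (ps : List (List Char)) (h : ∀ p ∈ ps, p ≠ []) :
    ps.any (fun p => PySem.Chars.isIn p l)
      = (List.range l.length).any (fun i =>
          ps.any (fun p => PySem.Chars.startswith (l.drop i) p)) := by
  apply Bool.eq_iff_iff.mpr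
  simp only [List.any_eq_true, List.mem_range, PySem.Chars.isIn_iff_infix,
    PySem.Chars.startswith_iff]
  constructor
  · rintro ⟨p, hp, hinf⟩
    obtain ⟨j, hj⟩ := (PySem.Chars.exists_prefix_drop_iff_isIn p l).mpr
      ((PySem.Chars.isIn_iff_infix p l).mpr hinf)
    refine ⟨j, ?_, p, hp, hj⟩
    by_contra hje
    have hd : List.drop j l = [] := List.drop_eq_nil_of_le (by omega)
    exact h p hp (List.prefix_nil.mp (hd ▸ hj))
  · rintro ⟨i, _, p, hp, hpre⟩
    exact ⟨p, hp, (PySem.Chars.isIn_iff_infix p l).mp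
      ((PySem.Chars.exists_prefix_drop_iff_isIn p l).mp ⟨i, hpre⟩)⟩

-- ===== VERDICT (by name: the statement is the Claim_ definition above) =====
theorem is_plan_acceptance_py_spec : Claim_equal_is_plan_acceptance_py := by
  intro message _
  unfold Spec_is_plan_acceptance_py is_plan_acceptance_py is_plan_acceptance_py_alt
  have h := pvScan_eq (PySem.Str.strip (PySem.Str.lower message)).toList
    (pvAcceptPhrases.map String.toList) (by decide)
  simp only [List.any_map, Function.comp_def] at h
  simp only [PySem.Str.isIn_eq]
  exact h
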